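-- pv_equiv track=rewrite | github.com/andrew-belikov/FinanceTracker | src/bot/entrypoint.py | merge_csv_values
-- ===== SOURCE A (Python) =====
-- from typing import Iterable
--
-- def merge_csv_values(values: Iterable[str]) -> str:
--     merged: list[str] = []
--     seen: set[str] = set()
--     for raw in values:
--         for item in raw.split(","):
--             candidate = item.strip()
--             if not candidate:
--                 continue
--             lowered = candidate.lower()
--             if lowered in seen:
--                 continue
--             seen.add(lowered)
--             merged.append(candidate)
--     return ",".join(merged)
-- ===== SOURCE B (Python) =====
-- def merge_csv_values(values):
--     tokens = [(t, t.lower()) for raw in values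
--               for t in (p.strip() for p in raw.split(",")) if t]
--     out = []
--     while tokens:
--         head, low = tokens[0]
--         out.append(head)
--         tokens = [p for p in tokens[1:] if p[1] != low]
--     return ",".join(out)
-- ===== Notes on version B (the rewrite author's own statement) =====
-- stated objective: alternative
-- what changed: Replaces A's single streaming pass with a mutable seen-set and merged-list by a staged design: first flatten all inputs into a clean (token, lowercase) pair list, then deduplicate it with a selection-style sieve loop that appends the head token and deletes all its later case-insensitive duplicates from the remaining list, so no seen-set or membership test exists at all.
import Mathlib
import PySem

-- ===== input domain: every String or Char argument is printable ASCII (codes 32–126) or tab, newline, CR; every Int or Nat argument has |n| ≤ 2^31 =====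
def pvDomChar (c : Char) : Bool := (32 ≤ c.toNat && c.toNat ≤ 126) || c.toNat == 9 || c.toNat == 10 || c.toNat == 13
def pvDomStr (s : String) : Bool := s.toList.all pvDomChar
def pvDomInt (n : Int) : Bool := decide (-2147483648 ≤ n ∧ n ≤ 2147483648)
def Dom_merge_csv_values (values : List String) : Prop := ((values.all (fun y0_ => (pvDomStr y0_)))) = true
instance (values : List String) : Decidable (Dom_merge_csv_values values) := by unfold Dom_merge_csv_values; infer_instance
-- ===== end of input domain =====

-- B stages the work differently: flatten all inputs into a clean (token, lowercase) pair
-- list first, then deduplicate it with a selection-style sieve loop (append the head token,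
-- delete its later case-insensitive duplicates, repeat) — no seen-set (objective: alternative).

-- ===== PORT A =====
def merge_csv_values (values : List String) : String :=
  PySem.Str.join ","
    (values.foldl (fun (st : List String × PySem.Set String) raw =>
      ((PySem.Str.split? raw ",").getD []).foldl (fun st item =>
        let candidate := PySem.Str.strip item
        if candidate = "" then st
        else
          let lowered := PySem.Str.lower candidate
          if PySem.Set.contains st.2 lowered then st
          else (st.1 ++ [candidate], PySem.Set.add st.2 lowered)) st) ([], PySem.Set.empty)).1

-- ===== PORT B =====
-- sieve loop: append the head token, drop its later case-insensitive duplicates, repeat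
def pvSieve (out : List String) : List (String × String) → List String
  | [] => out
  | p :: rest => pvSieve (out ++ [p.1]) (rest.filter (fun q => q.2 != p.2))
termination_by ts => ts.length
decreasing_by
  have h := List.length_filter_le (fun x : {x // x ∈ rest} => x.val.2 != p.2) rest.attach
  simp at h ⊢
  omega

def merge_csv_values_alt (values : List String) : String :=
  PySem.Str.join ","
    (pvSieve [] (values.flatMap (fun raw =>
      ((((PySem.Str.split? raw ",").getD []).map PySem.Str.strip).filter
        (fun t => t ≠ "")).map (fun t => (t, PySem.Str.lower t)))))

-- ===== PRECONDITION & SPEC =====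
def Spec_merge_csv_values (values : List String) (out : String) : Prop := out = merge_csv_values_alt values
instance (values : List String) (out : String) : Decidable (Spec_merge_csv_values values out) := by unfold Spec_merge_csv_values; infer_instance

-- ===== CLAIM (what is proved, stated in full; the proofs are below) =====
def Claim_equal_merge_csv_values : Prop := ∀ (values : List String), Dom_merge_csv_values values → Spec_merge_csv_values values (merge_csv_values values)

-- ===== LEMMAS AND PROOFS =====

-- A's dedup step on an already-stripped nonempty token
def pvStepD (st : List String × PySem.Set String) (c : String) : List String × PySem.Set String :=
  if PySem.Set.contains st.2 (PySem.Str.lower c) then st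
  else (st.1 ++ [c], PySem.Set.add st.2 (PySem.Str.lower c))

-- A's per-raw-item step (definitionally equal to the lambda in the port of A)
def pvStepA (st : List String × PySem.Set String) (item : String) : List String × PySem.Set String :=
  let candidate := PySem.Str.strip item
  if candidate = "" then st else pvStepD st candidate

theorem pvSieve_cons (out : List String) (p : String × String) (l : List (String × String)) :
    pvSieve out (p :: l) = pvSieve (out ++ [p.1]) (l.filter (fun q => q.2 != p.2)) := by
  rw [pvSieve.eq_def]

-- A's raw per-item step = pvStepD over the stripped, nonempty-filtered tokens
theorem pv_fold_strip (items : List String) (st : List String × PySem.Set String) :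
    items.foldl pvStepA st
    = ((items.map PySem.Str.strip).filter (fun t => t ≠ "")).foldl pvStepD st := by
  induction items generalizing st with
  | nil => rfl
  | cons x xs ih =>
    rw [List.foldl_cons, List.map_cons, List.filter_cons]
    by_cases hx : PySem.Str.strip x = ""
    · have h1 : pvStepA st x = st := by simp [pvStepA, hx]
      have h2 : (decide (PySem.Str.strip x ≠ "")) = false := by simp [hx]
      rw [h1, h2]
      simp only [Bool.false_eq_true, if_false]
      exact ih st
    · have h1 : pvStepA st x = pvStepD st (PySem.Str.strip x) := by simp [pvStepA, hx]
      have h2 : (decide (PySem.Str.strip x ≠ "")) = true := by simp [hx]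
      rw [h1, h2, if_pos rfl, List.foldl_cons]
      exact ih _

-- A's nested fold over values = fold of pvStepD over the flat token list
theorem pv_fold_flat (values : List String) (st : List String × PySem.Set String) :
    values.foldl (fun (st : List String × PySem.Set String) raw =>
      ((PySem.Str.split? raw ",").getD []).foldl pvStepA st) st
    = (values.flatMap (fun raw =>
        (((PySem.Str.split? raw ",").getD []).map PySem.Str.strip).filter (fun t => t ≠ ""))).foldl
          pvStepD st := by
  induction values generalizing st with
  | nil => rfl
  | cons v vs ih =>
    rw [List.foldl_cons, List.flatMap_cons, List.foldl_append, pv_fold_strip, ih]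

-- the fold of pvStepD produces exactly the sieve of the still-unseen paired tokens
theorem pv_fold_sieve (ts : List String) (m : List String) (S : PySem.Set String) :
    (ts.foldl pvStepD (m, S)).1
    = pvSieve m ((ts.filter (fun t => !(PySem.Set.contains S (PySem.Str.lower t)))).map
        (fun t => (t, PySem.Str.lower t))) := by
  induction ts generalizing m S with
  | nil => rw [pvSieve.eq_def]; simp
  | cons c cs ih =>
    rw [List.foldl_cons, List.filter_cons]
    by_cases hc : PySem.Set.contains S (PySem.Str.lower c) = true
    · have hm : PySem.Str.lower c ∈ S := by simpa using hc
      have hstep : pvStepD (m, S) c = (m, S) := by simp [pvStepD, hm]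
      rw [hstep, if_neg (by simpa using hm)]
      exact ih m S
    · have hm : PySem.Str.lower c ∉ S := by simpa using hc
      have hstep : pvStepD (m, S) c = (m ++ [c], PySem.Set.add S (PySem.Str.lower c)) := by
        simp [pvStepD, hm]
      rw [hstep, if_pos (by simpa using hm), ih, List.map_cons, pvSieve_cons,
        List.filter_map, List.filter_filter]
      have hfilter :
          cs.filter (fun t => !(PySem.Set.contains (PySem.Set.add S (PySem.Str.lower c))
              (PySem.Str.lower t)))
          = cs.filter (fun t =>
              (((fun q : String × String => q.2 != (c, PySem.Str.lower c).2) ∘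
                (fun t => (t, PySem.Str.lower t))) t) &&
              (!(PySem.Set.contains S (PySem.Str.lower t)))) := by
        apply List.filter_congr
        intro t _
        by_cases h1 : PySem.Str.lower t = PySem.Str.lower c <;>
          simp [PySem.Set.add, PySem.Set.contains, hm, h1]
      rw [← hfilter]

-- ===== VERDICT (by name: the statement is the Claim_ definition above) =====
theorem merge_csv_values_spec : Claim_equal_merge_csv_values := by
  intro values _
  unfold Spec_merge_csv_values merge_csv_values merge_csv_values_alt
  show PySem.Str.join ","
      (values.foldl (fun (st : List String × PySem.Set String) raw =>
        ((PySem.Str.split? raw ",").getD []).foldl pvStepA st) ([], PySem.Set.empty)).1 = _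
  rw [pv_fold_flat, pv_fold_sieve]
  have hid : ∀ (l : List String),
      l.filter (fun t => !(PySem.Set.contains PySem.Set.empty (PySem.Str.lower t))) = l := by
    intro l
    apply List.filter_eq_self.mpr
    intro t _
    simp [PySem.Set.contains, PySem.Set.empty]
  rw [hid, List.map_flatMap]
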